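-- pv_equiv track=rewrite | github.com/ShizeLiu666/excel2json | convert2.py | process_groups
-- ===== SOURCE A (Python) =====
-- def process_groups(split_data):
--     groups_content = split_data.get("groups", [])
--     groups_data = []
--     current_group = None
--
--     for line in groups_content:
--         line = line.strip()
--
--         if line.startswith("NAME:"):
--             current_group = line.replace("NAME:", "").strip()
--             continue
--
--         if line.startswith("DEVICE CONTROL:"):
--             continue
--
--         if current_group:
--             groups_data.append({
--                 "groupName": current_group,
--                 "devices": line
--             })
--
--     return {"groups": groups_data}
-- ===== SOURCE B (Python) =====
-- def process_groups(split_data):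
--     lines = split_data.get("groups", [])
--     # pass 1: build sections (name, device-lines)
--     sections = []
--     pending = None  # (name, [lines]) of the currently open section; None before the first NAME
--     for raw in lines:
--         line = raw.strip()
--         if line.startswith("NAME:"):
--             if pending is not None:
--                 sections.append(pending)
--             pending = (line.replace("NAME:", "").strip(), [])
--         elif not line.startswith("DEVICE CONTROL:"):
--             if pending is not None:
--                 pending[1].append(line)
--     if pending is not None:
--         sections.append(pending)
--     # pass 2: flatten, dropping sections whose name is empty
--     groups_data = [{"groupName": name, "devices": d}
--                    for name, devs in sections if name
--                    for d in devs]
--     return {"groups": groups_data}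
-- ===== Notes on version B (the rewrite author's own statement) =====
-- stated objective: alternative
-- what changed: B replaces A's single loop with an accumulating flag by a two-pass decomposition: first group the lines into (name, device-lines) sections, then flatten the sections into the result dicts, filtering out empty-named sections.
import Mathlib
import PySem

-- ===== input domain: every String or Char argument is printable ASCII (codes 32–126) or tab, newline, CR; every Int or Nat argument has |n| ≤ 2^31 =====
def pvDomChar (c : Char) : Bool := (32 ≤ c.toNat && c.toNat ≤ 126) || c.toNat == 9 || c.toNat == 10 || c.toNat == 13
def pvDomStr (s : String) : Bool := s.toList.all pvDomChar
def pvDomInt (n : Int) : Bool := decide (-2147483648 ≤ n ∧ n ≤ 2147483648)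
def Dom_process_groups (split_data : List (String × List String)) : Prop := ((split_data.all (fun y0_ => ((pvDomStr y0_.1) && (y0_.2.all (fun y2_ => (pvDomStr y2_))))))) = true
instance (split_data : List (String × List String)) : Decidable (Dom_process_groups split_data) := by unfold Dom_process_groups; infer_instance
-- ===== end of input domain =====

-- B replaces A's single accumulating loop by a two-pass decomposition (build sections, then flatten); objective: alternative, same cost.




-- ===== PORT A =====
-- A: one loop, appending a result dict per device line while current_group is truthy.
def pgStepA (st : List (List (String × String)) × Option String) (line : String) :
    List (List (String × String)) × Option String :=
  let line := PySem.Str.strip line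
  if PySem.Str.startswith line "NAME:" then
    (st.1, some (PySem.Str.strip (PySem.Str.replace line "NAME:" "")))
  else if PySem.Str.startswith line "DEVICE CONTROL:" then
    st
  else
    match st.2 with
    | some cg => if cg ≠ "" then (st.1 ++ [[("groupName", cg), ("devices", line)]], st.2) else st
    | none => st

def process_groups (split_data : List (String × List String)) : List (String × List (List (String × String))) :=
  let groups_content := (List.lookup "groups" split_data).getD []   -- split_data.get("groups", []) (first match)
  let st := groups_content.foldl pgStepA ([], none)
  [("groups", st.1)]

-- ===== PORT B =====
-- B: pass 1 groups the lines into (name, device-lines) sections; pass 2 flattens them.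
def pgClose (st : List (String × List String) × Option (String × List String)) : List (String × List String) :=
  match st.2 with
  | some p => st.1 ++ [p]
  | none => st.1

def pgStep (st : List (String × List String) × Option (String × List String)) (raw : String) :
    List (String × List String) × Option (String × List String) :=
  let line := PySem.Str.strip raw
  if PySem.Str.startswith line "NAME:" then
    (pgClose st, some (PySem.Str.strip (PySem.Str.replace line "NAME:" ""), []))
  else if PySem.Str.startswith line "DEVICE CONTROL:" then
    st
  else
    match st.2 with
    | some p => (st.1, some (p.1, p.2 ++ [line]))
    | none => st

def process_groups_alt (split_data : List (String × List String)) : List (String × List (List (String × String))) :=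
  let lines := (List.lookup "groups" split_data).getD []   -- split_data.get("groups", []) (first match)
  let sections := pgClose (lines.foldl pgStep ([], none))
  let groups_data :=
    (sections.filter (fun s => s.1 ≠ "")).flatMap
      (fun s => s.2.map (fun d => [("groupName", s.1), ("devices", d)]))
  [("groups", groups_data)]

-- ===== PRECONDITION & SPEC =====
def Spec_process_groups (split_data : List (String × List String)) (out : List (String × List (List (String × String)))) : Prop := out = process_groups_alt split_data
instance (split_data : List (String × List String)) (out : List (String × List (List (String × String)))) : Decidable (Spec_process_groups split_data out) := by unfold Spec_process_groups; infer_instance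

-- ===== CLAIM (what is proved, stated in full; the proofs are below) =====
def Claim_equal_process_groups : Prop := ∀ (split_data : List (String × List String)), Dom_process_groups split_data → Spec_process_groups split_data (process_groups split_data)

-- ===== LEMMAS AND PROOFS =====

-- the dicts emitted by a completed list of sections
def pgEmit (sections : List (String × List String)) : List (List (String × String)) :=
  (sections.filter (fun s => s.1 ≠ "")).flatMap
    (fun s => s.2.map (fun d => [("groupName", s.1), ("devices", d)]))

-- the dicts the open section contributes so far
def pgEmitP (p : Option (String × List String)) : List (List (String × String)) :=
  match p with
  | some q => pgEmit [q]
  | none => []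

-- A's view of a B state
def pgAbs (st : List (String × List String) × Option (String × List String)) :
    List (List (String × String)) × Option String :=
  (pgEmit st.1 ++ pgEmitP st.2, st.2.map Prod.fst)

theorem pgEmit_append (xs ys : List (String × List String)) :
    pgEmit (xs ++ ys) = pgEmit xs ++ pgEmit ys := by
  simp [pgEmit, List.filter_append]

theorem pgEmit_close (st : List (String × List String) × Option (String × List String)) :
    pgEmit (pgClose st) = pgEmit st.1 ++ pgEmitP st.2 := by
  obtain ⟨d, p⟩ := st
  cases p <;> simp [pgClose, pgEmitP, pgEmit_append]

theorem pgStep_abs (st : List (String × List String) × Option (String × List String)) (x : String) :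
    pgStepA (pgAbs st) x = pgAbs (pgStep st x) := by
  obtain ⟨done, pending⟩ := st
  simp only [pgStepA, pgStep, pgAbs]
  split_ifs with h1 h2
  · rcases pending with _ | ⟨n, ds⟩
    · simp [pgClose, pgEmitP, pgEmit]
    · by_cases h3 : n = "" <;> simp [pgClose, h3, pgEmitP, pgEmit]
  · rfl
  · cases pending with
    | none => rfl
    | some p =>
      obtain ⟨n, ds⟩ := p
      by_cases h3 : n = "" <;>
        simp [h3, pgEmitP, pgEmit, List.map_append]

theorem pg_loop (l : List String) (st : List (String × List String) × Option (String × List String)) :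
    l.foldl pgStepA (pgAbs st) = pgAbs (l.foldl pgStep st) := by
  induction l generalizing st with
  | nil => rfl
  | cons x xs ih => simp only [List.foldl_cons, pgStep_abs, ih]

-- ===== VERDICT (by name: the statement is the Claim_ definition above) =====
theorem process_groups_spec : Claim_equal_process_groups := by
  intro split_data _
  unfold Spec_process_groups process_groups process_groups_alt
  have h := pg_loop ((List.lookup "groups" split_data).getD []) ([], none)
  have habs : pgAbs ([], none) = ([], none) := by simp [pgAbs, pgEmit, pgEmitP]
  rw [habs] at h
  simp only [h, pgAbs]
  rw [show pgEmit (List.foldl pgStep ([], none) ((List.lookup "groups" split_data).getD [])).1 ++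
        pgEmitP (List.foldl pgStep ([], none) ((List.lookup "groups" split_data).getD [])).2
      = pgEmit (pgClose (List.foldl pgStep ([], none) ((List.lookup "groups" split_data).getD [])))
      from (pgEmit_close _).symm]
  rfl
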